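-- pv_equiv track=rewrite | github.com/yoyoMael/Graduation | ML_test/kmeans_basic.py | clf
-- ===== SOURCE A (Python) =====
-- import math
--
-- def distance2(a, b):
--   return math.pow((a[0]-b[0]),2) + math.pow((a[1] - b[1]),2)
--
-- def clf(a, centers, labels):
--   labels = []
--   distances = []
--   for center in centers:
--     distances.append(distance2(a, center))
--   min_distance = min(distances)
--   for i in range(0,len(distances)):
--     if distances[i] == min_distance:
--       return i
-- ===== SOURCE B (Python) =====
-- def clf(a, centers, labels):
--     best_i, best_d = 0, None
--     for i, (cx, cy) in enumerate(centers):
--         d = (a[0] - cx) ** 2 + (a[1] - cy) ** 2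
--         if best_d is None or d < best_d:
--             best_i, best_d = i, d
--     return best_i
-- ===== Notes on version B (the rewrite author's own statement) =====
-- stated objective: simpler
-- what changed: Replaces the three phases (build a distances list, take min, rescan for the first matching index) with one fused enumerate loop keeping a running best index and best squared distance (strict < preserves first-index tie-breaking), using exact integer arithmetic instead of math.pow floats.
-- outside the precondition, e.g. on clf((0, 0), [(1073741824, 1), (1073741824, 0)], []): A returns 0, B returns 1
import Mathlib
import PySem

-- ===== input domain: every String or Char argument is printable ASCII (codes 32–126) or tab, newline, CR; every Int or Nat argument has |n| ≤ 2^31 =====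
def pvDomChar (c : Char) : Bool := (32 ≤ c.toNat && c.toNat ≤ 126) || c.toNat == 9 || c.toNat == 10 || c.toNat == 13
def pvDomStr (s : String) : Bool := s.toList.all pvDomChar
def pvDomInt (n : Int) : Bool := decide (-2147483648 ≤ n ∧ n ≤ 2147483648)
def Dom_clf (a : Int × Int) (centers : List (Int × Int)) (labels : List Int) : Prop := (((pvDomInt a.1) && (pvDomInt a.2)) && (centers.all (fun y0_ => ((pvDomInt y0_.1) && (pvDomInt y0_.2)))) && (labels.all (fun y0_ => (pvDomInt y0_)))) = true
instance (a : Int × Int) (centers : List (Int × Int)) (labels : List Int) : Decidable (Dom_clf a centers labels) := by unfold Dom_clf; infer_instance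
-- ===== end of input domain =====

-- B fuses A's three phases (distances list, min, rescan for first match) into one running-best
-- loop with exact integer arithmetic; equivalence proved on Pre_clf (nonempty centers, coordinates
-- bounded so A's float arithmetic is exact).


-- ===== PORT A =====
-- distance2: Python computes it with math.pow floats; exact in Int on Pre_clf's coordinate bound
def pvDist2 (a b : Int × Int) : Int := (a.1 - b.1) ^ 2 + (a.2 - b.2) ^ 2

-- the second loop of A: for i in range(0,len(distances)): if distances[i] == min_distance: return i
def pvFind (ds : List Int) (m : Int) (i : Int) : Int :=
  match ds with
  | [] => 0          -- loop falls through (Python returns None); unreachable when m ∈ ds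
  | d :: t => if d == m then i else pvFind t m (i + 1)

def clf (a : Int × Int) (centers : List (Int × Int)) (labels : List Int) : Int :=
  let distances := centers.foldl (fun acc c => acc ++ [pvDist2 a c]) []
  match PySem.List.min? distances (fun x => x) with
  | none => 0        -- Python raises ValueError here; excluded by Pre_clf
  | some m => pvFind distances m 0

-- ===== PORT B =====
def pvLoop (a : Int × Int) (cs : List (Int × Int)) (i bestI : Int) (bestD : Option Int) : Int :=
  match cs with
  | [] => bestI
  | c :: t =>
    let d := (a.1 - c.1) ^ 2 + (a.2 - c.2) ^ 2
    match bestD with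
    | none => pvLoop a t (i + 1) i (some d)
    | some bd => if d < bd then pvLoop a t (i + 1) i (some d) else pvLoop a t (i + 1) bestI (some bd)

def clf_alt (a : Int × Int) (centers : List (Int × Int)) (labels : List Int) : Int :=
  pvLoop a centers 0 0 none

-- ===== PRECONDITION & SPEC =====
-- Pre_clf excludes empty centers (A's min([]) raises ValueError) and coordinates with |x| > 2^25:
-- there A still returns, but its math.pow float squared distances (up to ~2^65 > 2^53) round, and the
-- index it returns is an artefact of float rounding that an exact integer implementation defensibly
-- does not reproduce (see the cite in claim.json).
def Pre_clf (a : Int × Int) (centers : List (Int × Int)) (labels : List Int) : Prop :=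
  centers ≠ [] ∧
  a.1.natAbs ≤ 33554432 ∧ a.2.natAbs ≤ 33554432 ∧
  ∀ c ∈ centers, c.1.natAbs ≤ 33554432 ∧ c.2.natAbs ≤ 33554432

instance (a : Int × Int) (centers : List (Int × Int)) (labels : List Int) : Decidable (Pre_clf a centers labels) := by unfold Pre_clf; infer_instance

def pvWitness_clf : (Int × Int) × (List (Int × Int)) × List Int := ((1, 2), [(0, 0), (3, 4)], [])

def Spec_clf (a : Int × Int) (centers : List (Int × Int)) (labels : List Int) (out : Int) : Prop := out = clf_alt a centers labels
instance (a : Int × Int) (centers : List (Int × Int)) (labels : List Int) (out : Int) : Decidable (Spec_clf a centers labels out) := by unfold Spec_clf; infer_instance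

-- ===== CLAIM (what is proved, stated in full; the proofs are below) =====
def Claim_equal_clf : Prop := ∀ (a : Int × Int) (centers : List (Int × Int)) (labels : List Int), Dom_clf a centers labels → Pre_clf a centers labels → Spec_clf a centers labels (clf a centers labels)
-- ===== LEMMAS AND PROOFS =====

-- first index (as offset) of the minimum squared distance
def pvFam (a : Int × Int) (cs : List (Int × Int)) : Int :=
  match cs with
  | [] => 0
  | c :: t => if t.all (fun c' => pvDist2 a c ≤ pvDist2 a c') then 0 else 1 + pvFam a t

lemma foldl_append_dist (a : Int × Int) (cs : List (Int × Int)) (acc : List Int) :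
    cs.foldl (fun acc c => acc ++ [pvDist2 a c]) acc = acc ++ cs.map (pvDist2 a) := by
  induction cs generalizing acc with
  | nil => simp
  | cons c t ih => simp [List.foldl, ih]

lemma pvFind_eq_fam (a : Int × Int) (cs : List (Int × Int)) (m i : Int)
    (hmem : m ∈ cs.map (pvDist2 a)) (hmin : ∀ x ∈ cs.map (pvDist2 a), m ≤ x) :
    pvFind (cs.map (pvDist2 a)) m i = i + pvFam a cs := by
  induction cs generalizing i with
  | nil => simp at hmem
  | cons c t ih =>
    simp only [List.map_cons, pvFind, pvFam]
    by_cases hd : pvDist2 a c = m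
    · have hall : t.all (fun c' => pvDist2 a c ≤ pvDist2 a c') := by
        simp only [List.all_eq_true, decide_eq_true_eq]
        intro c' hc'
        exact hd ▸ hmin _ (List.mem_cons_of_mem _ (List.mem_map.mpr ⟨c', hc', rfl⟩))
      rw [if_pos hall, if_pos (by simp [hd] : (pvDist2 a c == m) = true)]
      simp
    · have hmt : m ∈ t.map (pvDist2 a) := by
        rcases List.mem_cons.mp hmem with h | h
        · exact absurd h.symm hd
        · exact h
      have hlt : m < pvDist2 a c :=
        lt_of_le_of_ne (hmin _ (by simp)) (fun h => hd h.symm)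
      have hnall : ¬ t.all (fun c' => pvDist2 a c ≤ pvDist2 a c') := by
        rcases List.mem_map.mp hmt with ⟨c', hc', rfl⟩
        simp only [List.all_eq_true, decide_eq_true_eq]
        intro h
        exact absurd (h c' hc') (by omega)
      have := ih (i + 1) hmt (fun x hx => hmin x (by simp at hx ⊢; exact Or.inr hx))
      rw [if_neg (by simp [hd] : ¬ ((pvDist2 a c == m) = true)), this, if_neg hnall]
      ring

lemma pvLoop_some_eq (a : Int × Int) (cs : List (Int × Int)) (i bestI b : Int) :
    pvLoop a cs i bestI (some b) =
      if cs.all (fun c => b ≤ pvDist2 a c) then bestI else i + pvFam a cs := by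
  induction cs generalizing i bestI b with
  | nil => simp [pvLoop]
  | cons c t ih =>
    simp only [pvLoop, pvFam]
    by_cases hd : pvDist2 a c < b
    · have hna : ¬ (c :: t).all (fun c' => b ≤ pvDist2 a c') := by
        simp only [List.all_cons, Bool.and_eq_true, decide_eq_true_eq, not_and]
        intro h; omega
      rw [if_pos (show (a.1 - c.1) ^ 2 + (a.2 - c.2) ^ 2 < b from hd), ih, if_neg hna]
      by_cases hall : t.all (fun c' => pvDist2 a c ≤ pvDist2 a c')
      · rw [if_pos, if_pos hall]
        · ring_nf
        · simpa [pvDist2] using hall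
      · rw [if_neg, if_neg hall]
        · ring
        · simpa [pvDist2] using hall
    · rw [if_neg (show ¬ ((a.1 - c.1) ^ 2 + (a.2 - c.2) ^ 2 < b) from hd), ih]
      by_cases hall : t.all (fun c' => b ≤ pvDist2 a c')
      · have : (c :: t).all (fun c' => b ≤ pvDist2 a c') := by
          simp only [List.all_cons, Bool.and_eq_true, decide_eq_true_eq] at hall ⊢
          exact ⟨by omega, hall⟩
        rw [if_pos hall, if_pos this]
      · have hna : ¬ (c :: t).all (fun c' => b ≤ pvDist2 a c') := by
          simp only [List.all_cons, Bool.and_eq_true, decide_eq_true_eq, not_and] at hall ⊢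
          intro _; exact hall
        have hnd : ¬ t.all (fun c' => pvDist2 a c ≤ pvDist2 a c') := by
          intro hnd'
          apply hall
          simp only [List.all_eq_true, decide_eq_true_eq] at hnd' ⊢
          intro c' hc'
          exact le_trans (not_lt.mp hd) (hnd' c' hc')
        rw [if_neg hall, if_neg hna, if_neg hnd]
        ring

lemma clf_alt_eq_fam (a : Int × Int) (c : Int × Int) (t : List (Int × Int)) (labels : List Int) :
    clf_alt a (c :: t) labels = pvFam a (c :: t) := by
  simp only [clf_alt, pvLoop, pvLoop_some_eq, pvFam]
  by_cases hall : t.all (fun c' => pvDist2 a c ≤ pvDist2 a c')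
  · rw [if_pos, if_pos hall]
    simpa [pvDist2] using hall
  · rw [if_neg, if_neg hall]
    · ring_nf
    · simpa [pvDist2] using hall

-- ===== VERDICT (by name: the statement is the Claim_ definition above) =====
theorem clf_spec : Claim_equal_clf := by
  intro a centers labels _hdom hpre
  obtain ⟨hne, -⟩ := hpre
  obtain ⟨c, t, rfl⟩ := List.exists_cons_of_ne_nil hne
  show clf a (c :: t) labels = clf_alt a (c :: t) labels
  rw [clf_alt_eq_fam]
  simp only [clf, foldl_append_dist, List.nil_append]
  rcases hmin : PySem.List.min? ((c :: t).map (pvDist2 a)) (fun x => x) with _ | m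
  · rw [PySem.List.min?_eq_none_iff] at hmin
    simp at hmin
  · have hmem := PySem.List.min?_mem hmin
    have hle := PySem.List.min?_isMin hmin
    show pvFind ((c :: t).map (pvDist2 a)) m 0 = pvFam a (c :: t)
    rw [pvFind_eq_fam a (c :: t) m 0 hmem hle]
    simp
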